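-- pv_equiv track=rewrite | github.com/pypi-data/pypi-mirror-401 | packages/imas-data-dictionary/imas_data_dictionary-4.1.1.tar.gz/imas_data_dictionary-4.1.1/docs/sphinx_dd_extension/dd_changelog.py | replace_ids_names_with_links
-- ===== SOURCE A (Python) =====
-- def link_to_ids(ids_name):
--     return f":dd:ids:`{ids_name.lower()}`"
--
-- def replace_ids_names_with_links(ids_list, text):
--     return "\n".join(
--         [
--             " ".join(
--                 [
--                     ",".join(
--                         [
--                             link_to_ids(x) if x.lower() in ids_list else x
--                             for x in j.split(",")
--                         ]
--                     )
--                     for j in k.split(" ")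
--                 ]
--             )
--             for k in text.split("\n")
--         ]
--     )
-- ===== SOURCE B (Python) =====
-- def link_to_ids(ids_name):
--     return f":dd:ids:`{ids_name.lower()}`"
--
-- def replace_ids_names_with_links(ids_list, text):
--     # one linear scan over the characters instead of three nested split/join passes
--     def repl(tok):
--         return link_to_ids(tok) if tok.lower() in ids_list else tok
--     out = []
--     cur = []
--     for ch in text:
--         if ch in '\n ,':
--             out.append(repl(''.join(cur)))
--             out.append(ch)
--             cur = []
--         else:
--             cur.append(ch)
--     out.append(repl(''.join(cur)))
--     return ''.join(out)
-- ===== Notes on version B (the rewrite author's own statement) =====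
-- stated objective: alternative
-- what changed: A's three nested split/map/join passes (by newline, then space, then comma) are replaced by one linear scan over the characters with a token buffer, emitting each delimiter and each (possibly linked) token as it is completed.
import Mathlib
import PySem

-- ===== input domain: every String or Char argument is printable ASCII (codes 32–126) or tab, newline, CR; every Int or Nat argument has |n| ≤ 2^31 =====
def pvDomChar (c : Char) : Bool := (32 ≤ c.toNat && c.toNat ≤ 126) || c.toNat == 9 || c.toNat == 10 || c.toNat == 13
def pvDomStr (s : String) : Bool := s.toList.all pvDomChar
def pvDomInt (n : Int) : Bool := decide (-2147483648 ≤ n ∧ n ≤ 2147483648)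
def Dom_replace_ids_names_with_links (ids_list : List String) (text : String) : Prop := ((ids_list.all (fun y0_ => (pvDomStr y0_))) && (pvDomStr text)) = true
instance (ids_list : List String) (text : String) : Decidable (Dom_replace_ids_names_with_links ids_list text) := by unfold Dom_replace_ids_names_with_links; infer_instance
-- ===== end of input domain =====

-- B replaces A's three nested split/map/join passes by one linear character scan with a token buffer (alternative decomposition, same return value).


-- ===== PORT A =====
-- helper link_to_ids at the character-list level (the f-string is concatenation)
def link_to_ids (ids_name : List Char) : List Char :=
  (":dd:ids:`".toList) ++ PySem.Chars.lower ids_name ++ ['`']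

-- the comprehension's element: link_to_ids(x) if x.lower() in ids_list else x
def pvReplA (ids_list : List String) (x : List Char) : List Char :=
  if ids_list.contains (String.ofList (PySem.Chars.lower x)) then link_to_ids x else x

def replace_ids_names_with_links (ids_list : List String) (text : String) : String :=
  String.ofList
    (PySem.Chars.join ['\n']
      ((PySem.Chars.splitOn text.toList ['\n']).map (fun k =>
        PySem.Chars.join [' ']
          ((PySem.Chars.splitOn k [' ']).map (fun j =>
            PySem.Chars.join [',']
              ((PySem.Chars.splitOn j [',']).map (fun x => pvReplA ids_list x)))))))

-- ===== PORT B =====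
-- Source B's repl(tok)
def pvReplB (ids_list : List String) (tok : List Char) : List Char :=
  if ids_list.contains (String.ofList (PySem.Chars.lower tok)) then link_to_ids tok else tok

-- Source B's single loop: cur is the token buffer (built by cons, read reversed = Python's append/''.join)
def pvScanB (ids_list : List String) (cur : List Char) : List Char → List Char
  | [] => pvReplB ids_list cur.reverse
  | ch :: cs =>
      if ch == '\n' || ch == ' ' || ch == ',' then
        pvReplB ids_list cur.reverse ++ ch :: pvScanB ids_list [] cs
      else
        pvScanB ids_list (ch :: cur) cs

def replace_ids_names_with_links_alt (ids_list : List String) (text : String) : String :=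
  String.ofList (pvScanB ids_list [] text.toList)

-- ===== PRECONDITION & SPEC =====
def Spec_replace_ids_names_with_links (ids_list : List String) (text : String) (out : String) : Prop := out = replace_ids_names_with_links_alt ids_list text
instance (ids_list : List String) (text : String) (out : String) : Decidable (Spec_replace_ids_names_with_links ids_list text out) := by unfold Spec_replace_ids_names_with_links; infer_instance

-- ===== CLAIM (what is proved, stated in full; the proofs are below) =====
def Claim_equal_replace_ids_names_with_links : Prop := ∀ (ids_list : List String) (text : String), Dom_replace_ids_names_with_links ids_list text → Spec_replace_ids_names_with_links ids_list text (replace_ids_names_with_links ids_list text)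

-- ===== LEMMAS AND PROOFS =====

-- reference single-character splitter (Python's s.split(c)), first piece prefixed by pre
def mySplit (c : Char) (pre : List Char) : List Char → List (List Char)
  | [] => [pre]
  | ch :: cs => if ch == c then pre :: mySplit c [] cs else mySplit c (pre ++ [ch]) cs

def scanG (d : Char → Bool) (f : List Char → List Char) (cur : List Char) : List Char → List Char
  | [] => f cur.reverse
  | ch :: cs =>
      if d ch then f cur.reverse ++ ch :: scanG d f [] cs
      else scanG d f (ch :: cur) cs

theorem splitOn_go_char (c : Char) :
    ∀ (l : List Char) (fuel : Nat) (cur : List Char) (acc : List (List Char)),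
      l.length < fuel →
      PySem.Chars.splitOn.go [c] fuel l cur acc = acc.reverse ++ mySplit c cur.reverse l := by
  intro l
  induction l with
  | nil =>
    intro fuel cur acc h
    match fuel, h with
    | Nat.succ f, _ =>
      simp [PySem.Chars.splitOn.go, mySplit]
  | cons ch rest ih =>
    intro fuel cur acc h
    match fuel, h with
    | Nat.succ f, h =>
      rw [PySem.Chars.splitOn.go]
      by_cases hc : ch = c
      · subst hc
        have hp : List.isPrefixOf [ch] (ch :: rest) = true := by simp [List.isPrefixOf]
        simp only [hp, if_pos, List.length_cons, List.length_nil, List.drop_succ_cons, List.drop_zero]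
        rw [ih f [] (cur.reverse :: acc) (by simpa using Nat.lt_of_succ_lt_succ h)]
        simp [mySplit]
      · have hp : List.isPrefixOf [c] (ch :: rest) = false := by
          simp [List.isPrefixOf]
          exact fun hh => absurd hh.symm hc
        simp only [hp]
        rw [ih f (ch :: cur) acc (by simpa using Nat.lt_of_succ_lt_succ h)]
        simp [mySplit, hc]

theorem mySplit_eq_splitOn (c : Char) (s : List Char) :
    PySem.Chars.splitOn s [c] = mySplit c [] s := by
  rw [PySem.Chars.splitOn, splitOn_go_char c s (s.length+1) [] [] (Nat.lt_succ_self _)]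
  simp

-- a run with no delimiters is a single token
theorem scanG_flat (d : Char → Bool) (f : List Char → List Char) :
    ∀ (t cur : List Char), (∀ ch ∈ t, d ch = false) →
      scanG d f cur t = f (cur.reverse ++ t) := by
  intro t
  induction t with
  | nil => intro cur _; simp [scanG]
  | cons ch cs ih =>
    intro cur h
    have hch : d ch = false := h ch (List.mem_cons_self ..)
    simp only [scanG, hch, Bool.false_eq_true, if_false]
    rw [ih (ch :: cur) (fun x hx => h x (List.mem_cons_of_mem _ hx))]
    simp

-- mySplit with a prefix = mySplit with [] , first piece prefixed
theorem mySplit_pre (c : Char) :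
    ∀ (s pre : List Char), ∃ h t, mySplit c [] s = h :: t ∧ mySplit c pre s = (pre ++ h) :: t := by
  intro s
  induction s with
  | nil => intro pre; exact ⟨[], [], by simp [mySplit], by simp [mySplit]⟩
  | cons ch cs ih =>
    intro pre
    by_cases hc : ch = c
    · subst hc
      exact ⟨[], mySplit ch [] cs, by simp [mySplit], by simp [mySplit]⟩
    · obtain ⟨h, t, h1, h2⟩ := ih [ch]
      obtain ⟨h', t', h1', h2'⟩ := ih (pre ++ [ch])
      rw [h1] at h1'
      injection h1' with e1 e2
      subst e1; subst e2
      exact ⟨ch :: h, t, by simpa [mySplit, hc] using h2, by simpa [mySplit, hc] using h2'⟩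

theorem scanG_prefix_flat (d : Char → Bool) (f : List Char → List Char) :
    ∀ (u : List Char), (∀ ch ∈ u, d ch = false) → ∀ (cur' v : List Char),
      scanG d f cur' (u ++ v) = scanG d f (u.reverse ++ cur') v := by
  intro u
  induction u with
  | nil => intro _ cur' v; simp
  | cons ch us ih =>
    intro h cur' v
    have hch : d ch = false := h ch (List.mem_cons_self ..)
    simp only [List.cons_append, scanG, hch, Bool.false_eq_true, if_false]
    rw [ih (fun x hx => h x (List.mem_cons_of_mem _ hx)) (ch :: cur') v]
    simp

theorem join_char_head (c : Char) (x : List Char) (t : List (List Char)) :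
    PySem.Chars.join [c] (x :: t) = x ++ PySem.Chars.join [c] ([] :: t) := by
  cases t <;> simp [PySem.Chars.join, List.intercalate]

theorem scanG_split (d : Char → Bool) (f : List Char → List Char) (c : Char) :
    ∀ (s cur : List Char), (∀ ch ∈ cur, (ch == c || d ch) = false) →
      PySem.Chars.join [c] ((mySplit c cur.reverse s).map (scanG d f [])) =
        scanG (fun ch => ch == c || d ch) f cur s := by
  intro s
  induction s with
  | nil =>
    intro cur hcur
    have hfree : ∀ ch ∈ cur.reverse, d ch = false := by
      intro ch hch
      have := hcur ch (List.mem_reverse.mp hch)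
      simp only [Bool.or_eq_false_iff] at this
      exact this.2
    simp only [mySplit, List.map_cons, List.map_nil]
    rw [PySem.Chars.join_singleton, scanG_flat d f cur.reverse [] hfree]
    simp [scanG]
  | cons ch cs ih =>
    intro cur hcur
    have hfree : ∀ x ∈ cur.reverse, d x = false := by
      intro x hx
      have := hcur x (List.mem_reverse.mp hx)
      simp only [Bool.or_eq_false_iff] at this
      exact this.2
    by_cases hc : ch = c
    · subst hc
      obtain ⟨h, t, h1, _⟩ := mySplit_pre ch cs []
      have ihz := ih [] (by intro x hx; cases hx)
      simp only [List.reverse_nil] at ihz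
      rw [h1] at ihz
      simp only [mySplit, beq_self_eq_true, if_pos, List.map_cons, h1]
      rw [PySem.Chars.join_cons_cons, scanG_flat d f cur.reverse [] hfree]
      simp only [List.map_cons] at ihz
      have hd' : (ch == ch || d ch) = true := by simp
      simp only [scanG, hd', if_pos]
      rw [← ihz]
      simp
    · by_cases hd : d ch = true
      · -- delimiter of d, not c
        obtain ⟨h, t, h1, h2⟩ := mySplit_pre c cs (cur.reverse ++ [ch])
        have hstep : mySplit c cur.reverse (ch :: cs) = (cur.reverse ++ [ch] ++ h) :: t := by
          simp only [mySplit, beq_iff_eq, hc, if_false]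
          exact h2
        rw [hstep]
        simp only [List.map_cons]
        rw [join_char_head]
        have hg : scanG d f [] (cur.reverse ++ [ch] ++ h) =
            f cur.reverse ++ ch :: scanG d f [] h := by
          rw [List.append_assoc, scanG_prefix_flat d f cur.reverse hfree [] ([ch] ++ h)]
          simp [scanG, hd]
        have ihz := ih [] (by intro x hx; cases hx)
        simp only [List.reverse_nil] at ihz
        rw [h1] at ihz
        simp only [List.map_cons] at ihz
        rw [join_char_head] at ihz
        have hd' : (ch == c || d ch) = true := by simp [hd]
        simp only [scanG, hd', if_pos]
        rw [← ihz, hg]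
        simp
      · have hstep : mySplit c cur.reverse (ch :: cs) = mySplit c ((ch :: cur).reverse) cs := by
          simp only [mySplit, beq_iff_eq, hc, if_false]
          simp
        rw [hstep, ih (ch :: cur) ?_]
        · have hd' : (ch == c || d ch) = false := by simp [hd, hc]
          simp [scanG, hd']
        · intro x hx
          rcases List.mem_cons.mp hx with rfl | hx2
          · simp [hc, Bool.eq_false_iff.mpr hd]
          · exact hcur x hx2


theorem pvRepl_eq (ids_list : List String) (x : List Char) : pvReplB ids_list x = pvReplA ids_list x := rfl

-- B's scanner is scanG instantiated with the three delimiters and repl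
theorem pvScanB_eq (ids_list : List String) :
    ∀ (s cur : List Char),
      pvScanB ids_list cur s =
        scanG (fun ch => ch == '\n' || (ch == ' ' || (ch == ',' || false))) (pvReplA ids_list) cur s := by
  intro s
  induction s with
  | nil => intro cur; rfl
  | cons ch cs ih =>
    intro cur
    simp only [pvScanB, scanG, pvRepl_eq, Bool.or_false, Bool.or_assoc, ih]

theorem portA_inner (ids_list : List String) (j : List Char) :
    PySem.Chars.join [','] ((PySem.Chars.splitOn j [',']).map (fun x => pvReplA ids_list x)) =
      scanG (fun ch => ch == ',' || false) (pvReplA ids_list) [] j := by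
  rw [mySplit_eq_splitOn]
  have hm : (mySplit ',' [] j).map (fun x => pvReplA ids_list x) =
      (mySplit ',' [] j).map (scanG (fun _ => false) (pvReplA ids_list) []) := by
    apply List.map_congr_left
    intro x _
    rw [scanG_flat (fun _ => false) (pvReplA ids_list) x [] (fun _ _ => rfl)]
    simp
  rw [hm]
  have := scanG_split (fun _ => false) (pvReplA ids_list) ',' j [] (by intro x hx; cases hx)
  simpa using this

theorem portA_mid (ids_list : List String) (k : List Char) :
    PySem.Chars.join [' ']
        ((PySem.Chars.splitOn k [' ']).map (fun j =>
          PySem.Chars.join [','] ((PySem.Chars.splitOn j [',']).map (fun x => pvReplA ids_list x)))) =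
      scanG (fun ch => ch == ' ' || (ch == ',' || false)) (pvReplA ids_list) [] k := by
  rw [mySplit_eq_splitOn]
  have hm : (mySplit ' ' [] k).map (fun j =>
        PySem.Chars.join [','] ((PySem.Chars.splitOn j [',']).map (fun x => pvReplA ids_list x))) =
      (mySplit ' ' [] k).map (scanG (fun ch => ch == ',' || false) (pvReplA ids_list) []) := by
    apply List.map_congr_left
    intro j _
    exact portA_inner ids_list j
  rw [hm]
  have := scanG_split (fun ch => ch == ',' || false) (pvReplA ids_list) ' ' k []
    (by intro x hx; cases hx)
  simpa using this

theorem portA_outer (ids_list : List String) (s : List Char) :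
    PySem.Chars.join ['\n']
        ((PySem.Chars.splitOn s ['\n']).map (fun k =>
          PySem.Chars.join [' ']
            ((PySem.Chars.splitOn k [' ']).map (fun j =>
              PySem.Chars.join [','] ((PySem.Chars.splitOn j [',']).map (fun x => pvReplA ids_list x)))))) =
      scanG (fun ch => ch == '\n' || (ch == ' ' || (ch == ',' || false))) (pvReplA ids_list) [] s := by
  rw [mySplit_eq_splitOn]
  have hm : (mySplit '\n' [] s).map (fun k =>
        PySem.Chars.join [' ']
          ((PySem.Chars.splitOn k [' ']).map (fun j =>
            PySem.Chars.join [','] ((PySem.Chars.splitOn j [',']).map (fun x => pvReplA ids_list x))))) =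
      (mySplit '\n' [] s).map (scanG (fun ch => ch == ' ' || (ch == ',' || false)) (pvReplA ids_list) []) := by
    apply List.map_congr_left
    intro k _
    exact portA_mid ids_list k
  rw [hm]
  have := scanG_split (fun ch => ch == ' ' || (ch == ',' || false)) (pvReplA ids_list) '\n' s []
    (by intro x hx; cases hx)
  simpa using this

-- ===== VERDICT (by name: the statement is the Claim_ definition above) =====
theorem replace_ids_names_with_links_spec : Claim_equal_replace_ids_names_with_links := by
  intro ids_list text _
  unfold Spec_replace_ids_names_with_links replace_ids_names_with_links replace_ids_names_with_links_alt
  rw [portA_outer, pvScanB_eq]
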